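-- pv_equiv track=rewrite | github.com/variability2026-submission/replication-package | fca_core.py | mutual_exclusions
-- ===== SOURCE A (Python) =====
-- from typing import Dict, FrozenSet, Set, Tuple
--
-- Context = Dict[str, Set[str]]
--
-- def mutual_exclusions(context: Context) -> list[tuple[str, str]]:
--     """Find attribute pairs that never co-occur in any object."""
--     all_attrs = sorted(set().union(*context.values()))
--     pairs: list[tuple[str, str]] = []
--     for i, a1 in enumerate(all_attrs):
--         for a2 in all_attrs[i + 1:]:
--             if not any(a1 in a and a2 in a for a in context.values()):
--                 # Verify both actually appear
--                 if (any(a1 in a for a in context.values()) and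
--                         any(a2 in a for a in context.values())):
--                     pairs.append((a1, a2))
--     return pairs
-- ===== SOURCE B (Python) =====
-- def mutual_exclusions(context):
--     """Find attribute pairs that never co-occur in any object."""
--     # Inverted index: attribute -> set of object indices containing it.
--     extent = {}
--     for idx, obj in enumerate(context.values()):
--         for attr in obj:
--             extent.setdefault(attr, set()).add(idx)
--     result = []
--     rest = sorted(extent)
--     while rest:
--         a1, rest = rest[0], rest[1:]
--         for a2 in rest:
--             if extent[a1].isdisjoint(extent[a2]):
--                 result.append((a1, a2))
--     return result
-- ===== Notes on version B (the rewrite author's own statement) =====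
-- stated objective: faster
-- what changed: B builds an inverted index (attribute -> set of object indices) in one pass and decides each candidate pair by a disjointness test on the two index sets, iterating pairs by peeling the sorted attribute list tail by tail, instead of A's per-pair rescan of all objects plus the redundant 'both appear' rescans.
import Mathlib
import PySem

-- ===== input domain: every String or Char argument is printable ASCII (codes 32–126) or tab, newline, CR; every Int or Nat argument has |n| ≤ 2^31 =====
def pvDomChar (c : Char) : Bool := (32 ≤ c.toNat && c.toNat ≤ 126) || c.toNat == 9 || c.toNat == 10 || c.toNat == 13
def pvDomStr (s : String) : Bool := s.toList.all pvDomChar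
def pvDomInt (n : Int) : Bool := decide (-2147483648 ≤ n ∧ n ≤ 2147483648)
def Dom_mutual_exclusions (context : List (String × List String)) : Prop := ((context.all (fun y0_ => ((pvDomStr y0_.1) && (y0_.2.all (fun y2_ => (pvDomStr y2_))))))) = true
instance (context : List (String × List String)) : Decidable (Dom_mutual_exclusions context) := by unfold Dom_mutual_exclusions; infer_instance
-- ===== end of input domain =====

-- B replaces A's per-pair rescan of all objects by an inverted index (attribute -> set of
-- object indices) built in one pass; a candidate pair is kept iff its two index sets are
-- disjoint, and pairs are enumerated by peeling the sorted attribute list tail by tail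
-- (objective: faster by a constant-factor mechanism; A's redundant "both appear" rescans drop out).

-- ===== PORT A =====
def mutual_exclusions (context : List (String × List String)) : List (String × String) :=
  let vals := (PySem.Dict.ofList context).values
  let all_attrs := PySem.List.sorted
    (vals.foldl (fun s a => PySem.Set.update s a) (PySem.Set.empty : PySem.Set String))
    (fun x => x) false
  (PySem.List.enumerate all_attrs).foldl (fun pairs ia =>
    (PySem.List.slice all_attrs (some (ia.1 + 1)) none).foldl (fun pairs a2 =>
      if !(vals.any (fun a => a.contains ia.2 && a.contains a2)) then
        -- Verify both actually appear
        if vals.any (fun a => a.contains ia.2) && vals.any (fun a => a.contains a2) then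
          pairs ++ [(ia.2, a2)]
        else pairs
      else pairs) pairs) []

-- ===== PORT B =====
-- the while loop: peel the first attribute, scan the remaining tail, recurse on the tail
def pvAltLoop (extent : PySem.Dict String (PySem.Set Int)) :
    List String → List (String × String) → List (String × String)
  | [], result => result
  | a1 :: rest, result =>
      pvAltLoop extent rest
        (rest.foldl (fun res a2 =>
          if PySem.Set.isdisjoint (extent.getD a1 PySem.Set.empty) (extent.getD a2 PySem.Set.empty)
          then res ++ [(a1, a2)] else res) result)

def mutual_exclusions_alt (context : List (String × List String)) : List (String × String) :=
  -- extent.setdefault(attr, set()).add(idx)  ==  extent[attr] = extent.get(attr, set()) ∪ {idx}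
  let extent := (PySem.List.enumerate (PySem.Dict.ofList context).values).foldl
    (fun d io => io.2.foldl
      (fun d attr => d.modify attr PySem.Set.empty (fun s => PySem.Set.add s io.1)) d)
    (PySem.Dict.empty : PySem.Dict String (PySem.Set Int))
  pvAltLoop extent (PySem.List.sorted extent.keys (fun x => x) false) []

-- ===== PRECONDITION & SPEC =====
def Spec_mutual_exclusions (context : List (String × List String)) (out : List (String × String)) : Prop := out = mutual_exclusions_alt context
instance (context : List (String × List String)) (out : List (String × String)) : Decidable (Spec_mutual_exclusions context out) := by unfold Spec_mutual_exclusions; infer_instance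

-- ===== CLAIM (what is proved, stated in full; the proofs are below) =====
def Claim_equal_mutual_exclusions : Prop := ∀ (context : List (String × List String)), Dom_mutual_exclusions context → Spec_mutual_exclusions context (mutual_exclusions context)

-- ===== LEMMAS AND PROOFS =====

-- canonical pair list both loop shapes reduce to
def pvPairs (keep : String → String → Bool) : List String → List (String × String)
  | [] => []
  | a :: rest => (rest.filter (keep a)).map (fun b => (a, b)) ++ pvPairs keep rest

theorem pvPairs_congr (k1 k2 : String → String → Bool) (l : List String)
    (h : ∀ a ∈ l, ∀ b ∈ l, k1 a b = k2 a b) : pvPairs k1 l = pvPairs k2 l := by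
  induction l with
  | nil => rfl
  | cons a rest ih =>
    simp only [pvPairs]
    rw [List.filter_congr (fun b hb => h a (List.mem_cons_self) b (List.mem_cons_of_mem _ hb)),
      ih (fun x hx y hy => h x (List.mem_cons_of_mem _ hx) y (List.mem_cons_of_mem _ hy))]

-- membership in the union accumulator built by foldl/update (A's attribute set, = B's extent keys)
theorem pv_mem_foldl_update (vals : List (List String)) (s : PySem.Set String) (x : String) :
    x ∈ vals.foldl (fun s a => PySem.Set.update s a) s ↔ x ∈ s ∨ ∃ a ∈ vals, x ∈ a := by
  induction vals generalizing s with
  | nil => simp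
  | cons v vs ih =>
    simp only [List.foldl_cons, ih, PySem.Set.mem_update, List.mem_cons]
    constructor
    · rintro ((h | h) | ⟨a, ha, hx⟩)
      · exact Or.inl h
      · exact Or.inr ⟨v, Or.inl rfl, h⟩
      · exact Or.inr ⟨a, Or.inr ha, hx⟩
    · rintro (h | ⟨a, (rfl | ha), hx⟩)
      · exact Or.inl (Or.inl h)
      · exact Or.inl (Or.inr hx)
      · exact Or.inr ⟨a, ha, hx⟩

-- B's loop produces pvPairs of the disjointness test
theorem pvAltLoop_eq (extent : PySem.Dict String (PySem.Set Int)) (l : List String)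
    (result : List (String × String)) :
    pvAltLoop extent l result = result ++ pvPairs
      (fun a1 a2 => PySem.Set.isdisjoint (extent.getD a1 PySem.Set.empty) (extent.getD a2 PySem.Set.empty)) l := by
  induction l generalizing result with
  | nil => simp [pvAltLoop, pvPairs]
  | cons a rest ih =>
    simp only [pvAltLoop, pvPairs, ih, PySem.List.foldl_append_if, List.append_assoc]

-- A's enumerate/slice double fold produces pvPairs of its test
theorem pvA_shape_aux (keep : String → String → Bool) (attrs : List String) (l : List String)
    (k : Nat) (hk : attrs.drop k = l) (init : List (String × String)) :
    (PySem.List.enumerate l (k : Int)).foldl (fun pairs ia =>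
      (PySem.List.slice attrs (some (ia.1 + 1)) none).foldl (fun pairs a2 =>
        if keep ia.2 a2 then pairs ++ [(ia.2, a2)] else pairs) pairs) init
    = init ++ pvPairs keep l := by
  induction l generalizing k init with
  | nil => simp [pvPairs]
  | cons a rest ih =>
    rw [PySem.List.enumerate_cons, List.foldl_cons]
    have hslice : PySem.List.slice attrs (some ((k : Int) + 1)) none = rest := by
      rw [PySem.List.slice_from attrs (a := (k : Int) + 1) (by omega)]
      have : ((k : Int) + 1).toNat = k + 1 := by omega
      rw [this, ← List.drop_drop, hk, List.drop_one, List.tail_cons]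
    have hk' : attrs.drop (k + 1) = rest := by
      rw [← List.drop_drop, hk, List.drop_one, List.tail_cons]
    have hcast : (k : Int) + 1 = ((k + 1 : Nat) : Int) := by push_cast; ring
    rw [hslice, PySem.List.foldl_append_if, hcast, ih (k + 1) hk', pvPairs,
      List.append_assoc]

-- membership in the per-object inner extent fold
theorem pv_extent_inner (obj : List String) (i : Int) (d : PySem.Dict String (PySem.Set Int))
    (a : String) (j : Int) :
    j ∈ (obj.foldl (fun d attr => d.modify attr PySem.Set.empty (fun s => PySem.Set.add s i)) d).getD a PySem.Set.empty ↔
      j ∈ d.getD a PySem.Set.empty ∨ (a ∈ obj ∧ j = i) := by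
  induction obj generalizing d with
  | nil => simp
  | cons x xs ih =>
    simp only [List.foldl_cons, ih, PySem.Dict.getD_modify, List.mem_cons]
    split_ifs with hax
    · subst hax
      simp only [PySem.Set.mem_add]
      tauto
    · tauto

-- membership in the full extent fold: indices of the objects containing a
theorem pv_extent_mem (vals : List (List String)) (s : Int)
    (d : PySem.Dict String (PySem.Set Int)) (a : String) (j : Int) :
    j ∈ ((PySem.List.enumerate vals s).foldl (fun d io => io.2.foldl
        (fun d attr => d.modify attr PySem.Set.empty (fun st => PySem.Set.add st io.1)) d) d).getD a PySem.Set.empty ↔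
      j ∈ d.getD a PySem.Set.empty ∨ ∃ k : Nat, ∃ h : k < vals.length, a ∈ vals[k] ∧ j = s + k := by
  induction vals generalizing s d with
  | nil => simp
  | cons v vs ih =>
    rw [PySem.List.enumerate_cons, List.foldl_cons]
    simp only [ih, pv_extent_inner, List.length_cons]
    constructor
    · rintro ((h | ⟨hm, rfl⟩) | ⟨k, hlt, hm, rfl⟩)
      · exact Or.inl h
      · exact Or.inr ⟨0, by omega, by simpa using hm, by omega⟩
      · exact Or.inr ⟨k + 1, by omega, by simpa using hm, by push_cast; ring⟩
    · rintro (h | ⟨k, hlt, hm, rfl⟩)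
      · exact Or.inl (Or.inl h)
      · cases k with
        | zero => exact Or.inl (Or.inr ⟨by simpa using hm, by omega⟩)
        | succ k => exact Or.inr ⟨k, by omega, by simpa using hm, by push_cast; ring⟩

-- keys of the extent fold = A's union accumulator
theorem pv_extent_keys (vals : List (List String)) (s : Int)
    (d : PySem.Dict String (PySem.Set Int)) :
    ((PySem.List.enumerate vals s).foldl (fun d io => io.2.foldl
        (fun d attr => d.modify attr PySem.Set.empty (fun st => PySem.Set.add st io.1)) d) d).keys =
      vals.foldl (fun ks a => PySem.Set.update ks a) d.keys := by
  induction vals generalizing s d with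
  | nil => simp
  | cons v vs ih =>
    rw [PySem.List.enumerate_cons, List.foldl_cons, List.foldl_cons, ih,
      PySem.Dict.keys_foldl_modify]

-- ===== VERDICT (by name: the statement is the Claim_ definition above) =====
theorem mutual_exclusions_spec : Claim_equal_mutual_exclusions := by
  intro context _
  unfold Spec_mutual_exclusions mutual_exclusions mutual_exclusions_alt
  dsimp only
  set vals := (PySem.Dict.ofList context).values with hvals
  set E := (PySem.List.enumerate vals).foldl (fun d io => io.2.foldl
      (fun d attr => d.modify attr PySem.Set.empty (fun st => PySem.Set.add st io.1)) d)
      (PySem.Dict.empty : PySem.Dict String (PySem.Set Int)) with hE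
  have hkeys : E.keys = vals.foldl (fun ks a => PySem.Set.update ks a) (PySem.Set.empty : PySem.Set String) := by
    rw [hE]
    exact pv_extent_keys vals 0 PySem.Dict.empty
  rw [pvAltLoop_eq, hkeys, List.nil_append]
  set attrs := PySem.List.sorted
    (vals.foldl (fun s a => PySem.Set.update s a) (PySem.Set.empty : PySem.Set String))
    (fun x => x) false with hattrs
  have hmemA : ∀ x : String, x ∈ attrs → ∃ a ∈ vals, x ∈ a := by
    intro x hx
    rw [hattrs, PySem.List.mem_sorted, pv_mem_foldl_update] at hx
    simpa [PySem.Set.empty] using hx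
  have hmemE : ∀ (a : String) (j : Int),
      j ∈ E.getD a PySem.Set.empty ↔ ∃ k : Nat, ∃ h : k < vals.length, a ∈ vals[k] ∧ j = (k : Int) := by
    intro a j
    rw [hE, pv_extent_mem]
    simp [PySem.Dict.getD_empty]
  -- rewrite A's nested ifs to a single test
  have hbody : (fun (pairs : List (String × String)) (ia : Int × String) =>
      (PySem.List.slice attrs (some (ia.1 + 1)) none).foldl (fun pairs a2 =>
        if !(vals.any (fun a => a.contains ia.2 && a.contains a2)) then
          if vals.any (fun a => a.contains ia.2) && vals.any (fun a => a.contains a2) then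
            pairs ++ [(ia.2, a2)]
          else pairs
        else pairs) pairs)
      = (fun (pairs : List (String × String)) (ia : Int × String) =>
      (PySem.List.slice attrs (some (ia.1 + 1)) none).foldl (fun pairs a2 =>
        if (!(vals.any (fun a => a.contains ia.2 && a.contains a2)) &&
            (vals.any (fun a => a.contains ia.2) && vals.any (fun a => a.contains a2)))
        then pairs ++ [(ia.2, a2)] else pairs) pairs) := by
    funext pairs ia
    have hfun : (fun (acc : List (String × String)) (a2 : String) =>
        if !(vals.any (fun a => a.contains ia.2 && a.contains a2)) then
          if vals.any (fun a => a.contains ia.2) && vals.any (fun a => a.contains a2) then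
            acc ++ [(ia.2, a2)]
          else acc
        else acc)
        = (fun (acc : List (String × String)) (a2 : String) =>
        if (!(vals.any (fun a => a.contains ia.2 && a.contains a2)) &&
            (vals.any (fun a => a.contains ia.2) && vals.any (fun a => a.contains a2)))
        then acc ++ [(ia.2, a2)] else acc) := by
      funext acc a2
      split_ifs <;> simp_all <;> tauto
    rw [hfun]
  rw [hbody]
  have := pvA_shape_aux
    (fun a1 a2 => !(vals.any (fun a => a.contains a1 && a.contains a2)) &&
      (vals.any (fun a => a.contains a1) && vals.any (fun a => a.contains a2)))
    attrs attrs 0 (by simp) []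
  simp only [Int.natCast_zero] at this
  rw [this, List.nil_append]
  -- the two keep predicates agree on attributes that occur
  apply pvPairs_congr
  intro a1 h1 a2 h2
  obtain ⟨o1, ho1, hm1⟩ := hmemA a1 h1
  obtain ⟨o2, ho2, hm2⟩ := hmemA a2 h2
  have hany1 : vals.any (fun a => a.contains a1) = true := by
    simp only [List.any_eq_true]
    exact ⟨o1, ho1, List.contains_iff_mem.mpr hm1⟩
  have hany2 : vals.any (fun a => a.contains a2) = true := by
    simp only [List.any_eq_true]
    exact ⟨o2, ho2, List.contains_iff_mem.mpr hm2⟩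
  rw [hany1, hany2]
  have hco : vals.any (fun a => a.contains a1 && a.contains a2) = true ↔
      ∃ o ∈ vals, a1 ∈ o ∧ a2 ∈ o := by
    simp [List.any_eq_true]
  have hdisj : PySem.Set.isdisjoint (E.getD a1 PySem.Set.empty) (E.getD a2 PySem.Set.empty) = true ↔
      ¬ ∃ o ∈ vals, a1 ∈ o ∧ a2 ∈ o := by
    rw [PySem.Set.isdisjoint_iff]
    constructor
    · rintro h ⟨o, ho, hx1, hx2⟩
      obtain ⟨k, hlt, rfl⟩ := List.getElem_of_mem ho
      exact h (k : Int) ((hmemE a1 k).mpr ⟨k, hlt, hx1, rfl⟩) ((hmemE a2 k).mpr ⟨k, hlt, hx2, rfl⟩)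
    · intro h j hj1 hj2
      obtain ⟨k, hlt, hm, rfl⟩ := (hmemE a1 j).mp hj1
      obtain ⟨k', hlt', hm', he⟩ := (hmemE a2 _).mp hj2
      have : k = k' := by omega
      subst this
      exact h ⟨vals[k], List.getElem_mem hlt, hm, hm'⟩
  by_cases hc : ∃ o ∈ vals, a1 ∈ o ∧ a2 ∈ o
  · rw [hco.mpr hc, Bool.eq_false_iff.mpr (fun h => (hdisj.mp h) hc)]
    simp
  · rw [Bool.eq_false_iff.mpr (fun h => hc (hco.mp h)), hdisj.mpr hc]
    simp
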